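-- pv_equiv track=rewrite | github.com/posl/comment_recommendation | script/mod_gen/2_time/ja/161_D/4.py | runrun
-- ===== SOURCE A (Python) =====
-- def runrun(n):
--     if n > 10**9:
--         return
--     yield n
--     a = n % 10
--     for b in [a-1, a, a+1]:
--         if 0 <= b <= 9:
--             yield from runrun(10*n+b)
-- ===== SOURCE B (Python) =====
-- def runrun(n):
--     LIMIT = 10 ** 9
--     stack = [n]
--     while stack:
--         x = stack.pop()
--         if x <= LIMIT:
--             yield x
--             a = x % 10
--             lo = a - 1 if a > 0 else 0
--             b = a + 1 if a < 9 else 9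
--             while b >= lo:
--                 stack.append(10 * x + b)
--                 b -= 1
-- ===== Notes on version B (the rewrite author's own statement) =====
-- stated objective: alternative
-- what changed: The recursive generator (pre-order DFS via recursion and 'yield from') is replaced by an iterative explicit-stack loop that clamps the child-digit range to [max(0,a-1), min(9,a+1)] and pushes it with a descending inner while-loop (no candidate list, no per-child membership test), so the stack top is always the leftmost child and the pre-order output sequence is identical.
import Mathlib
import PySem

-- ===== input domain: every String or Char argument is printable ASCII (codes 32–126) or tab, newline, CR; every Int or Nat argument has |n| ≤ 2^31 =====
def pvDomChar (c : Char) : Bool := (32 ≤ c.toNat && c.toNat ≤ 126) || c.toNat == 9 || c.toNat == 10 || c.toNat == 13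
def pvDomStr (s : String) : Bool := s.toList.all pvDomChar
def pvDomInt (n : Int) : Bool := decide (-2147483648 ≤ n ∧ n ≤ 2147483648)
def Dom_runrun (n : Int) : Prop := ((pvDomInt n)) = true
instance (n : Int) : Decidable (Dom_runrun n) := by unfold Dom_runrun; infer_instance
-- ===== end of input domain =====

-- B replaces A's recursive generator by an explicit-stack iterative loop that clamps the
-- child-digit range and pushes it with a descending inner while-loop; no speed claim.

-- ===== PORT A =====
-- A's recursion is made total with a fuel parameter; fuel 12 covers every n ≥ 1
-- (10*n+b at least decuples n each level, so the recursion depth is at most 11).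
def goA : Nat → Int → List Int
  | 0, _ => []
  | f+1, n =>
    if n > 1000000000 then []
    else
      let a := PySem.Int.mod n 10
      n :: List.foldl (fun acc b => if 0 ≤ b ∧ b ≤ 9 then acc ++ goA f (10*n+b) else acc)
            [] [a-1, a, a+1]

def runrun (n : Int) : List Int := goA 12 n

-- ===== PORT B =====
-- Source B's inner 'while b >= lo: stack.append(10*x+b); b -= 1' loop; the loop runs at
-- most 3 times, so fuel 10 is ample.
def pushB : Nat → Int → Int → Int → List Int → List Int
  | 0, _, _, _, st => st
  | f+1, x, lo, b, st => if b ≥ lo then pushB f x lo (b-1) ((10*x+b) :: st) else st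

-- Source B's outer while-loop over an explicit stack (Python list: append = cons on head
-- here, pop = head); fuel bounds the number of pops; 1062882 suffices for n ≥ 1.
def goB : Nat → List Int → List Int
  | 0, _ => []
  | _+1, [] => []
  | f+1, x :: rest =>
    if x ≤ 1000000000 then
      let a := PySem.Int.mod x 10
      x :: goB f (pushB 10 x (if a > 0 then a - 1 else 0) (if a < 9 then a + 1 else 9) rest)
    else goB f rest

def runrun_alt (n : Int) : List Int := goB 1062882 [n]

-- ===== PRECONDITION & SPEC =====
-- Pre_ excludes n ≤ 0: there every child 10*n+b stays ≤ 10^9, so Python A recurses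
-- forever and dies with RecursionError (B's loop likewise never terminates).
def Pre_runrun (n : Int) : Prop := 1 ≤ n
instance (n : Int) : Decidable (Pre_runrun n) := by unfold Pre_runrun; infer_instance
def pvWitness_runrun : Int := (5)

def Spec_runrun (n : Int) (out : List Int) : Prop := out = runrun_alt n
instance (n : Int) (out : List Int) : Decidable (Spec_runrun n out) := by unfold Spec_runrun; infer_instance

-- ===== CLAIM (what is proved, stated in full; the proofs are below) =====
def Claim_equal_runrun : Prop := ∀ (n : Int), Dom_runrun n → Pre_runrun n → Spec_runrun n (runrun n)

-- ===== LEMMAS AND PROOFS =====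

-- number of pops B's loop spends on the subtree rooted at n, mirrored on A's fuel structure
def cost : Nat → Int → Nat
  | 0, _ => 0
  | f+1, n =>
    if n > 1000000000 then 1
    else
      let a := PySem.Int.mod n 10
      1 + List.foldl (fun c b => if 0 ≤ b ∧ b ≤ 9 then c + cost f (10*n+b) else c)
            0 [a-1, a, a+1]

lemma goB_nil (F : Nat) : goB F [] = [] := by cases F <;> rfl

lemma mod10_bounds (n : Int) : 0 ≤ PySem.Int.mod n 10 ∧ PySem.Int.mod n 10 < 10 := by
  rw [PySem.Int.mod_eq_emod_of_pos (by norm_num)]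
  exact ⟨Int.emod_nonneg n (by norm_num), Int.emod_lt_of_pos n (by norm_num)⟩

lemma child_big {n b : Int} {f : Nat} (hn : 1 ≤ n) (hb : 0 ≤ b)
    (h : (1000000000:Int) < n * 10^(f+1)) : (1000000000:Int) < (10*n+b) * 10^f := by
  have hp : (0:Int) < 10^f := by positivity
  have he : n * 10^(f+1) = (10*n) * 10^f := by rw [pow_succ]; ring
  nlinarith

lemma cost_le : ∀ (f : Nat) (n : Int), cost f n + 1 ≤ 2 * 3^f := by
  intro f
  induction f with
  | zero => intro n; simp [cost]
  | succ f ih =>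
    intro n
    have h3 : 1 ≤ 3^f := Nat.one_le_pow _ _ (by norm_num)
    by_cases hb : n > 1000000000
    · simp [cost, hb, pow_succ]; omega
    · have h1 := ih (10*n + (PySem.Int.mod n 10 - 1))
      have h2 := ih (10*n + PySem.Int.mod n 10)
      have h4 := ih (10*n + (PySem.Int.mod n 10 + 1))
      simp only [cost, hb, if_false, List.foldl]
      split_ifs <;> simp only [pow_succ] <;> omega

lemma cost_step (g : Nat) (n : Int) (hb : ¬ n > 1000000000) :
    cost (g+1) n = 1 +
      (((if 0 ≤ PySem.Int.mod n 10 - 1 ∧ PySem.Int.mod n 10 - 1 ≤ 9 then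
            0 + cost g (10*n + (PySem.Int.mod n 10 - 1)) else 0) +
        (if 0 ≤ PySem.Int.mod n 10 ∧ PySem.Int.mod n 10 ≤ 9 then
            cost g (10*n + PySem.Int.mod n 10) else 0)) +
        (if 0 ≤ PySem.Int.mod n 10 + 1 ∧ PySem.Int.mod n 10 + 1 ≤ 9 then
            cost g (10*n + (PySem.Int.mod n 10 + 1)) else 0)) := by
  simp only [cost, hb, if_false, List.foldl]
  split_ifs <;> omega

lemma goA_step (g : Nat) (n : Int) (hb : ¬ n > 1000000000) :
    goA (g+1) n = n ::
      (((if 0 ≤ PySem.Int.mod n 10 - 1 ∧ PySem.Int.mod n 10 - 1 ≤ 9 then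
            [] ++ goA g (10*n + (PySem.Int.mod n 10 - 1)) else ([] : List Int)) ++
        (if 0 ≤ PySem.Int.mod n 10 ∧ PySem.Int.mod n 10 ≤ 9 then
            goA g (10*n + PySem.Int.mod n 10) else [])) ++
        (if 0 ≤ PySem.Int.mod n 10 + 1 ∧ PySem.Int.mod n 10 + 1 ≤ 9 then
            goA g (10*n + (PySem.Int.mod n 10 + 1)) else [])) := by
  simp only [goA, hb, if_false, List.foldl]
  split_ifs <;> simp

lemma goB_yield (g : Nat) (x : Int) (rest : List Int) (hb : x ≤ 1000000000) :
    goB (g+1) (x :: rest) = x :: goB g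
      (pushB 10 x (if PySem.Int.mod x 10 > 0 then PySem.Int.mod x 10 - 1 else 0)
        (if PySem.Int.mod x 10 < 9 then PySem.Int.mod x 10 + 1 else 9) rest) := by
  simp only [goB, hb, if_pos]

lemma goB_skip (g : Nat) (x : Int) (rest : List Int) (hb : ¬ x ≤ 1000000000) :
    goB (g+1) (x :: rest) = goB g rest := by
  simp [goB, hb]

-- evaluation of the inner push loop when three / two digits fit
lemma pushB_three (x lo : Int) (st : List Int) :
    pushB 10 x lo (lo+2) st = (10*x+lo) :: (10*x+(lo+1)) :: (10*x+(lo+2)) :: st := by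
  rw [pushB, if_pos (by omega), pushB, if_pos (by omega), pushB, if_pos (by omega),
      pushB, if_neg (by omega)]
  norm_num
  omega

lemma pushB_two (x lo : Int) (st : List Int) :
    pushB 10 x lo (lo+1) st = (10*x+lo) :: (10*x+(lo+1)) :: st := by
  rw [pushB, if_pos (by omega), pushB, if_pos (by omega), pushB, if_neg (by omega)]
  norm_num

lemma goB_chain : ∀ (f : Nat) (n : Int), 1 ≤ n → (1000000000:Int) < n * 10^f →
    ∀ (rest : List Int) (F : Nat),
      goB (cost (f+1) n + F) (n :: rest) = goA (f+1) n ++ goB F rest := by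
  intro f
  induction f with
  | zero =>
    intro n hn hbig rest F
    have hb : n > 1000000000 := by simpa using hbig
    have h1 : cost 1 n = 1 := by simp [cost, hb]
    have h2 : goA 1 n = [] := by simp [goA, hb]
    rw [h1, h2, Nat.add_comm, goB_skip _ _ _ (by omega)]
    simp
  | succ f ih =>
    intro n hn hbig rest F
    by_cases hb : n > 1000000000
    · have h1 : cost (f+1+1) n = 1 := by simp [cost, hb]
      have h2 : goA (f+1+1) n = [] := by simp [goA, hb]
      rw [h1, h2, Nat.add_comm, goB_skip _ _ _ (by omega)]
      simp
    · obtain ⟨ha0, ha9⟩ := mod10_bounds n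
      set a := PySem.Int.mod n 10 with hadef
      have h2 : (0 ≤ a ∧ a ≤ 9) := by omega
      have hc1 : 1 ≤ 10*n + (a - 1) := by omega
      have hc2 : 1 ≤ 10*n + a := by omega
      have hc3 : 1 ≤ 10*n + (a + 1) := by omega
      have hb2 : (1000000000:Int) < (10*n + a) * 10^f := child_big hn (by omega) hbig
      rw [cost_step _ n hb, goA_step _ n hb, ← hadef]
      by_cases hp1 : 1 ≤ a <;> by_cases hp3 : a ≤ 8
      · -- 1 ≤ a ≤ 8: lo = a-1, hi = a+1, three children
        have hq1 : (0 ≤ a - 1 ∧ a - 1 ≤ 9) := by omega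
        have hq3 : (0 ≤ a + 1 ∧ a + 1 ≤ 9) := by omega
        simp only [if_pos h2, if_pos hq1, if_pos hq3,
          Nat.zero_add, Nat.add_zero, List.nil_append, List.append_nil]
        have hb1 : (1000000000:Int) < (10*n + (a - 1)) * 10^f := child_big hn (by omega) hbig
        have hb3 : (1000000000:Int) < (10*n + (a + 1)) * 10^f := child_big hn (by omega) hbig
        have e : 1 + (cost (f+1) (10*n + (a-1)) + cost (f+1) (10*n + a)
              + cost (f+1) (10*n + (a+1))) + F
            = (cost (f+1) (10*n + (a-1)) + (cost (f+1) (10*n + a)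
              + (cost (f+1) (10*n + (a+1)) + F))) + 1 := by omega
        rw [e, goB_yield _ n _ (by omega), ← hadef,
          if_pos (show a > 0 by omega), if_pos (show a < 9 by omega),
          show a + 1 = (a-1) + 2 by ring, pushB_three,
          show (a-1) + 1 = a by ring, show (a-1) + 2 = a + 1 by ring,
          ih _ hc1 hb1, ih _ hc2 hb2, ih _ hc3 hb3]
        simp [List.append_assoc]
      · -- a = 9: lo = 8, hi = 9, two children (8 and 9)
        have ha : a = 9 := by omega
        have hq1 : (0 ≤ a - 1 ∧ a - 1 ≤ 9) := by omega
        have hq3 : ¬ (0 ≤ a + 1 ∧ a + 1 ≤ 9) := by omega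
        simp only [if_pos h2, if_pos hq1, if_neg hq3,
          Nat.zero_add, Nat.add_zero, List.nil_append, List.append_nil]
        have hb1 : (1000000000:Int) < (10*n + (a - 1)) * 10^f := child_big hn (by omega) hbig
        have e : 1 + (cost (f+1) (10*n + (a-1)) + cost (f+1) (10*n + a)) + F
            = (cost (f+1) (10*n + (a-1)) + (cost (f+1) (10*n + a) + F)) + 1 := by omega
        rw [e, goB_yield _ n _ (by omega), ← hadef,
          if_pos (show a > 0 by omega), if_neg (show ¬ a < 9 by omega),
          show (9:Int) = (a-1) + 1 by omega, pushB_two,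
          show (a-1) + 1 = a by ring,
          ih _ hc1 hb1, ih _ hc2 hb2]
        simp [List.append_assoc]
      · -- a = 0: lo = 0, hi = 1, two children (0 and 1)
        have ha : a = 0 := by omega
        have hq1 : ¬ (0 ≤ a - 1 ∧ a - 1 ≤ 9) := by omega
        have hq3 : (0 ≤ a + 1 ∧ a + 1 ≤ 9) := by omega
        simp only [if_pos h2, if_neg hq1, if_pos hq3,
          Nat.zero_add, Nat.add_zero, List.nil_append, List.append_nil]
        have hb3 : (1000000000:Int) < (10*n + (a + 1)) * 10^f := child_big hn (by omega) hbig
        have e : 1 + (cost (f+1) (10*n + a) + cost (f+1) (10*n + (a+1))) + F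
            = (cost (f+1) (10*n + a) + (cost (f+1) (10*n + (a+1)) + F)) + 1 := by omega
        rw [e, goB_yield _ n _ (by omega), ← hadef,
          if_neg (show ¬ a > 0 by omega), if_pos (show a < 9 by omega),
          show a + 1 = (0:Int) + 1 by omega, pushB_two,
          show (10*n + ((0:Int)+1)) = 10*n + (a+1) by omega,
          show (10*n + (0:Int)) = 10*n + a by omega,
          ih _ hc2 hb2, ih _ hc3 hb3]
        simp [List.append_assoc]
      · omega

-- ===== VERDICT (by name: the statement is the Claim_ definition above) =====
theorem runrun_spec : Claim_equal_runrun := by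
  intro n _ hn
  unfold Spec_runrun runrun runrun_alt
  have hn' : (1:Int) <= n := hn
  have hbig : (1000000000:Int) < n * 10^11 := by nlinarith
  have hcost : cost 12 n + 1 <= 2 * 3^12 := cost_le 12 n
  have hF : cost 12 n + (1062882 - cost 12 n) = 1062882 := by norm_num at hcost; omega
  have h := goB_chain 11 n hn hbig [] (1062882 - cost 12 n)
  rw [hF, goB_nil] at h
  simp at h
  exact h.symm
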